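-- pv_equiv track=rewrite | github.com/anagorko/inf | home/nagorko/dont_get_rooked.py | count_num_walls
-- ===== SOURCE A (Python) =====
-- def count_num_walls(row):
--     result = 0
--     last = ""
--     for x, i in enumerate(row):
--         if x == 0:
--             last = i
--             if i is not "X":
--                 result += 1
--         else:
--             if last == "X" and i is not "X":
--                 result += 1
--             last = i
--     return result
-- ===== SOURCE B (Python) =====
-- def count_num_walls(row):
--     # counting identity: each maximal non-"X" run of length k has k cells and
--     # k-1 internal adjacencies, so #runs = #non-X cells - #adjacent non-X pairs
--     opens = sum(1 for x in row if x != "X")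
--     glued = sum(1 for a, b in zip(row, row[1:]) if a != "X" and b != "X")
--     return opens - glued
-- ===== Notes on version B (the rewrite author's own statement) =====
-- stated objective: alternative
-- what changed: Replaced A's stateful last-tracking transition loop by a counting identity: number of non-'X' runs = (count of non-'X' cells) minus (count of adjacent pairs that are both non-'X'), computed as two independent stateless counts.
import Mathlib
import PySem

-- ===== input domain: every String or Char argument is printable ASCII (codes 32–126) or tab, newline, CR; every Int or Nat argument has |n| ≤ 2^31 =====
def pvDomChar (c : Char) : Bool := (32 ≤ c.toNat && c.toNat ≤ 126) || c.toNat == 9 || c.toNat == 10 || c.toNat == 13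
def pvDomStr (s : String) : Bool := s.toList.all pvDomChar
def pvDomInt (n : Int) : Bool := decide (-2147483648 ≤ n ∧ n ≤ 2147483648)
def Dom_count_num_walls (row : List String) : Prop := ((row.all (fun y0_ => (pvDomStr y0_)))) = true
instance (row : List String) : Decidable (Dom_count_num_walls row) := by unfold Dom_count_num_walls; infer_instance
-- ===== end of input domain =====

-- B replaces A's stateful last-tracking transition loop by a counting identity:
-- number of non-"X" runs = (#non-"X" cells) - (#adjacent pairs both non-"X"); same cost, no state.
-- Note: A's `i is not "X"` coincides with `i != "X"` (1-char strings are interned in CPython).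

-- ===== PORT A =====
def count_num_walls (row : List String) : Int :=
  ((PySem.List.enumerate row).foldl
    (fun (st : Int × String) (xi : Int × String) =>
      if xi.1 = 0 then
        ((if ¬ xi.2 = "X" then st.1 + 1 else st.1), xi.2)
      else
        ((if st.2 = "X" ∧ ¬ xi.2 = "X" then st.1 + 1 else st.1), xi.2))
    (0, "")).1

-- ===== PORT B =====
-- two stateless counts; row[1:] on a list is exactly row.drop 1 (PySem.List.slice_from)
def count_num_walls_alt (row : List String) : Int :=
  let opens : Int := ((row.filter (fun x => !(x == "X"))).length : Int)
  let glued : Int :=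
    (((row.zip (row.drop 1)).filter (fun p => !(p.1 == "X") && !(p.2 == "X"))).length : Int)
  opens - glued

-- ===== PRECONDITION & SPEC =====
def Spec_count_num_walls (row : List String) (out : Int) : Prop := out = count_num_walls_alt row
instance (row : List String) (out : Int) : Decidable (Spec_count_num_walls row out) := by unfold Spec_count_num_walls; infer_instance

-- ===== CLAIM (what is proved, stated in full; the proofs are below) =====
def Claim_equal_count_num_walls : Prop := ∀ (row : List String), Dom_count_num_walls row → Spec_count_num_walls row (count_num_walls row)

-- ===== LEMMAS AND PROOFS =====

-- count of non-"X" cells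
def opensI (t : List String) : Int := ((t.filter (fun x => !(x == "X"))).length : Int)

-- count of adjacent non-"X" pairs in last :: t
def gluedI (last : String) (t : List String) : Int :=
  ((((last :: t).zip t).filter (fun p => !(p.1 == "X") && !(p.2 == "X"))).length : Int)

theorem count_rest (t : List String) : ∀ (s : Int), 1 ≤ s → ∀ (r : Int) (last : String),
    ((PySem.List.enumerate t s).foldl
      (fun (st : Int × String) (xi : Int × String) =>
        if xi.1 = 0 then
          ((if ¬ xi.2 = "X" then st.1 + 1 else st.1), xi.2)
        else
          ((if st.2 = "X" ∧ ¬ xi.2 = "X" then st.1 + 1 else st.1), xi.2))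
      (r, last)).1 = r + opensI t - gluedI last t := by
  induction t with
  | nil => intro s hs r last; simp [PySem.List.enumerate, opensI, gluedI]
  | cons h t ih =>
      intro s hs r last
      rw [PySem.List.enumerate_cons]
      have hs0 : ¬ s = 0 := by omega
      simp only [List.foldl_cons, hs0, if_false]
      rw [ih (s + 1) (by omega)]
      simp only [opensI, gluedI, List.zip_cons_cons, List.filter_cons]
      by_cases hl : last = "X" <;> by_cases hh : h = "X" <;>
        simp [hl, hh] <;> push_cast <;> ring

-- ===== VERDICT (by name: the statement is the Claim_ definition above) =====
theorem count_num_walls_spec : Claim_equal_count_num_walls := by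
  intro row _
  unfold Spec_count_num_walls count_num_walls count_num_walls_alt
  cases row with
  | nil => simp [PySem.List.enumerate, opensI, gluedI]
  | cons h t =>
      rw [PySem.List.enumerate_cons]
      simp only [List.foldl_cons, if_true]
      rw [count_rest t (0 + 1) (by omega)]
      show _ = opensI (h :: t) - gluedI h t
      simp only [opensI, List.filter_cons]
      by_cases hh : h = "X" <;> simp [hh] <;> push_cast <;> ring
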